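-- pv_equiv track=rewrite | github.com/usnistgov/OOF2 | SRC/engine/snapnode.py | findSignature
-- ===== SOURCE A (Python) =====
-- from functools import reduce
--
-- def findSignature(transitionpoints):
--     # Returns the rotation and signature.
--     n = len(transitionpoints)
--     sig = [pt is not None for pt in transitionpoints] # 0's and 1's
--     # put in canonical order
--     max = -1
--     rotation = None
--     for i in range(n):
--         key = reduce(lambda x,y: 2*x+y, sig[i:]+sig[:i], 0)
--         if key > max:
--             max = key
--             rotation = i
--     return rotation, tuple(sig[rotation:] + sig[:rotation])
-- ===== SOURCE B (Python) =====
-- def findSignature(transitionpoints):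
--     # Returns the rotation and signature.
--     # Rolling key: the n-bit key of rotation i+1 is derived from rotation i's key
--     # in O(1) arithmetic steps, so no per-rotation re-reduction is needed.
--     sig = [pt is not None for pt in transitionpoints]
--     n = len(sig)
--     key = 0
--     for b in sig:
--         key = 2 * key + (1 if b else 0)
--     top = (1 << (n - 1)) if n else 0
--     best, rotation = -1, None
--     for i, b in enumerate(sig):
--         if key > best:
--             best, rotation = key, i
--         key = 2 * (key - (top if b else 0)) + (1 if b else 0)
--     return rotation, tuple(sig[rotation:] + sig[:rotation])
-- ===== Notes on version B (the rewrite author's own statement) =====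
-- stated objective: faster
-- what changed: B computes all rotation keys in one rolling pass -- key(i+1) is derived from key(i) by one O(1)-operation arithmetic update (drop top bit, shift, append bit) -- instead of A's rebuilding each n-bit key from scratch with reduce, so A's inner scan disappears.
import Mathlib
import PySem

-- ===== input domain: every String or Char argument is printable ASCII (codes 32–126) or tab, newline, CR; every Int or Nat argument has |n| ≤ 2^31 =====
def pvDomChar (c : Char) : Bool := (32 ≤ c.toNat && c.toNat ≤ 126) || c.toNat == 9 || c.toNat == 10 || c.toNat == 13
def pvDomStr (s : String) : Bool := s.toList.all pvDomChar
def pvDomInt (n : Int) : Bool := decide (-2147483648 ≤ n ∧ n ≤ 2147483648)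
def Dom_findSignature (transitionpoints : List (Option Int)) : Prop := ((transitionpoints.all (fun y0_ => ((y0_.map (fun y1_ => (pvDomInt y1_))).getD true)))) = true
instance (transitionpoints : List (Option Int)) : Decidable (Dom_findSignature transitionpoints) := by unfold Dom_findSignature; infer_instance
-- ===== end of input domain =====

-- B replaces A's per-rotation reduce (rebuilding each n-bit key from scratch) by a
-- single rolling-key pass: the key of rotation i+1 is obtained from rotation i's key
-- by one O(1)-operation arithmetic update (objective: faster).

-- ===== PORT A =====
def findSignature (transitionpoints : List (Option Int)) : Option Int × List Bool :=
  let n : Int := transitionpoints.length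
  let sig : List Bool := transitionpoints.map (fun pt => pt.isSome)
  let st := (PySem.List.pyRange 0 n 1).foldl
    (fun (st : Int × Option Int) i =>
      let key := (PySem.List.slice sig (some i) none ++ PySem.List.slice sig none (some i)).foldl
        (fun x y => 2 * x + (if y then 1 else 0)) 0
      if key > st.1 then (key, some i) else st)
    (-1, none)
  (st.2, PySem.List.slice sig st.2 none ++ PySem.List.slice sig none st.2)

-- ===== PORT B =====
def findSignature_alt (transitionpoints : List (Option Int)) : Option Int × List Bool :=
  let sig : List Bool := transitionpoints.map (fun pt => pt.isSome)
  let n := sig.length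
  let key0 : Int := sig.foldl (fun x b => 2 * x + (if b then 1 else 0)) 0
  let top : Int := if n ≠ 0 then 2 ^ (n - 1) else 0
  let st := (PySem.List.enumerate sig).foldl
    (fun (st : Int × Int × Option Int) (ib : Int × Bool) =>
      let br := if st.1 > st.2.1 then (st.1, some ib.1) else st.2
      (2 * (st.1 - (if ib.2 then top else 0)) + (if ib.2 then 1 else 0), br))
    (key0, -1, none)
  (st.2.2, PySem.List.slice sig st.2.2 none ++ PySem.List.slice sig none st.2.2)

-- ===== PRECONDITION & SPEC =====
def Spec_findSignature (transitionpoints : List (Option Int)) (out : Option Int × List Bool) : Prop := out = findSignature_alt transitionpoints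
instance (transitionpoints : List (Option Int)) (out : Option Int × List Bool) : Decidable (Spec_findSignature transitionpoints out) := by unfold Spec_findSignature; infer_instance

-- ===== CLAIM (what is proved, stated in full; the proofs are below) =====
def Claim_equal_findSignature : Prop := ∀ (transitionpoints : List (Option Int)), Dom_findSignature transitionpoints → Spec_findSignature transitionpoints (findSignature transitionpoints)

-- ===== LEMMAS AND PROOFS =====

-- A's integer key of a bit list (the reduce)
def keyB (l : List Bool) : Int :=
  l.foldl (fun x y => 2 * x + (if y then 1 else 0)) 0

-- the rotation sig[i:] + sig[:i], as A writes it
def rotI (sig : List Bool) (i : Int) : List Bool :=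
  PySem.List.slice sig (some i) none ++ PySem.List.slice sig none (some i)

-- key of the k-th rotation, in drop/take form
def keyN (sig : List Bool) (k : Nat) : Int := keyB (sig.drop k ++ sig.take k)

-- the loop bodies of the two ports, named (definitionally the lambdas in the ports)
def stepA (sig : List Bool) (st : Int × Option Int) (i : Int) : Int × Option Int :=
  if keyB (rotI sig i) > st.1 then (keyB (rotI sig i), some i) else st

def stepB (top : Int) (st : Int × Int × Option Int) (ib : Int × Bool) : Int × Int × Option Int :=
  let br := if st.1 > st.2.1 then (st.1, some ib.1) else st.2
  (2 * (st.1 - (if ib.2 then top else 0)) + (if ib.2 then 1 else 0), br)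

lemma findSignature_eq (tps : List (Option Int)) :
    findSignature tps =
      (((PySem.List.pyRange 0 tps.length 1).foldl (stepA (tps.map (fun pt => pt.isSome))) (-1, none)).2,
       PySem.List.slice (tps.map (fun pt => pt.isSome))
         ((PySem.List.pyRange 0 tps.length 1).foldl (stepA (tps.map (fun pt => pt.isSome))) (-1, none)).2 none
       ++ PySem.List.slice (tps.map (fun pt => pt.isSome)) none
         ((PySem.List.pyRange 0 tps.length 1).foldl (stepA (tps.map (fun pt => pt.isSome))) (-1, none)).2) := rfl

lemma findSignature_alt_eq (tps : List (Option Int)) :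
    findSignature_alt tps =
      (((PySem.List.enumerate (tps.map (fun pt => pt.isSome))).foldl
          (stepB (if (tps.map (fun pt => pt.isSome)).length ≠ 0 then 2 ^ ((tps.map (fun pt => pt.isSome)).length - 1) else 0))
          (keyB (tps.map (fun pt => pt.isSome)), -1, none)).2.2,
       PySem.List.slice (tps.map (fun pt => pt.isSome))
         (((PySem.List.enumerate (tps.map (fun pt => pt.isSome))).foldl
          (stepB (if (tps.map (fun pt => pt.isSome)).length ≠ 0 then 2 ^ ((tps.map (fun pt => pt.isSome)).length - 1) else 0))
          (keyB (tps.map (fun pt => pt.isSome)), -1, none)).2.2) none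
       ++ PySem.List.slice (tps.map (fun pt => pt.isSome)) none
         (((PySem.List.enumerate (tps.map (fun pt => pt.isSome))).foldl
          (stepB (if (tps.map (fun pt => pt.isSome)).length ≠ 0 then 2 ^ ((tps.map (fun pt => pt.isSome)).length - 1) else 0))
          (keyB (tps.map (fun pt => pt.isSome)), -1, none)).2.2)) := rfl

lemma keyB_foldl (l : List Bool) (acc : Int) :
    l.foldl (fun x y => 2 * x + (if y then 1 else 0)) acc = acc * 2 ^ l.length + keyB l := by
  induction l generalizing acc with
  | nil => simp [keyB]
  | cons x xs ih =>
    simp only [List.foldl_cons, List.length_cons]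
    rw [ih (2 * acc + (if x then 1 else 0))]
    have : keyB (x :: xs) = (2 * 0 + (if x then (1:Int) else 0)) * 2 ^ xs.length + keyB xs := by
      simp only [keyB, List.foldl_cons]; rw [ih]; rfl
    rw [this]; ring

lemma keyB_append (xs ys : List Bool) :
    keyB (xs ++ ys) = keyB xs * 2 ^ ys.length + keyB ys := by
  simp only [keyB, List.foldl_append]
  rw [keyB_foldl]; rfl

lemma keyB_cons (x : Bool) (xs : List Bool) :
    keyB (x :: xs) = (if x then (1:Int) else 0) * 2 ^ xs.length + keyB xs := by
  have : keyB (x :: xs) = (2 * 0 + (if x then (1:Int) else 0)) * 2 ^ xs.length + keyB xs := by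
    simp only [keyB, List.foldl_cons]; rw [keyB_foldl]; rfl
  rw [this]; ring

lemma rotI_natCast (sig : List Bool) (k : Nat) :
    rotI sig (k : Int) = sig.drop k ++ sig.take k := by
  rw [rotI, PySem.List.slice_from_natCast, PySem.List.slice_to_natCast]

-- the rolling-key recurrence B relies on
lemma keyN_succ (sig : List Bool) (k : Nat) (hk : k < sig.length) :
    keyN sig (k + 1) =
      2 * (keyN sig k - (if sig[k] then (2:Int) ^ (sig.length - 1) else 0))
        + (if sig[k] then 1 else 0) := by
  have hdrop : sig.drop k = sig[k] :: sig.drop (k + 1) := (List.getElem_cons_drop hk).symm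
  have htake : sig.take (k + 1) = sig.take k ++ [sig[k]] := by
    rw [List.take_succ, List.getElem?_eq_getElem hk]; rfl
  have hld : (sig.drop (k + 1)).length = sig.length - (k + 1) := List.length_drop ..
  have hlt : (sig.take k).length = k := List.length_take_of_le (le_of_lt hk)
  unfold keyN
  rw [hdrop, htake, ← List.append_assoc, List.cons_append,
      keyB_cons, keyB_append, keyB_append]
  have hs : (sig.drop (k+1) ++ sig.take k).length = sig.length - 1 := by
    rw [List.length_append, hld, hlt]; omega
  have h1 : (sig.drop (k+1)).length + (sig.take k).length = sig.length - 1 := by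
    rw [hld, hlt]; omega
  rw [hs]
  have hpow : (2:Int) ^ (sig.length - 1) = 2 ^ (sig.take k).length * 2 ^ (sig.drop (k+1)).length := by
    rw [← pow_add]; congr 1; omega
  have hsing : keyB [sig[k]] = (if sig[k] then (1:Int) else 0) := by
    cases h : sig[k] <;> simp [keyB]
  rw [hsing, hpow]
  cases h : sig[k] <;> simp <;> ring

-- loop invariant: B's rolling (key, best, rotation) tracks A's (max, rotation) fold
lemma loop_inv (top : Int) (sig : List Bool) (htop : top = 2 ^ (sig.length - 1)) :
    ∀ (t : List Bool) (k : Nat), sig.drop k = t → ∀ (acc : Int × Option Int),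
      ((PySem.List.enumerate t (k : Int)).foldl (stepB top) (keyN sig k, acc)).2
        = (PySem.List.pyRange (k : Int) (sig.length : Int) 1).foldl (stepA sig) acc := by
  intro t
  induction t with
  | nil =>
    intro k h acc
    have hk : (sig.length : Int) ≤ (k : Int) := by
      have := List.drop_eq_nil_iff.mp h
      exact_mod_cast this
    rw [PySem.List.enumerate_nil, PySem.List.pyRange_one_eq_nil hk]
    rfl
  | cons b rest ih =>
    intro k h acc
    have hk : k < sig.length := by
      by_contra hge
      rw [List.drop_eq_nil_of_le (by omega)] at h
      exact List.cons_ne_nil _ _ h.symm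
    have h0 : sig[k] :: sig.drop (k + 1) = b :: rest := by
      rw [List.getElem_cons_drop hk, h]
    have hb : sig[k] = b := (List.cons.injEq _ _ _ _ ▸ h0).1
    have hrest : sig.drop (k + 1) = rest := (List.cons.injEq _ _ _ _ ▸ h0).2
    rw [PySem.List.enumerate_cons, List.foldl_cons]
    have hstep : stepB top (keyN sig k, acc) ((k : Int), b)
        = (keyN sig (k + 1), stepA sig acc (k : Int)) := by
      unfold stepB stepA
      rw [rotI_natCast]
      have : keyB (sig.drop k ++ sig.take k) = keyN sig k := rfl
      rw [this]
      have hkey : 2 * (keyN sig k - (if b then top else 0)) + (if b then 1 else 0)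
          = keyN sig (k + 1) := by
        rw [keyN_succ sig k hk, hb, htop]
      simp only [hkey]
    rw [hstep,
        PySem.List.pyRange_one_cons (show (k : Int) < (sig.length : Int) by exact_mod_cast hk),
        List.foldl_cons]
    have hcast : (k : Int) + 1 = ((k + 1 : Nat) : Int) := by push_cast; ring
    rw [hcast]
    exact ih (k + 1) hrest (stepA sig acc (k : Int))

-- ===== VERDICT (by name: the statement is the Claim_ definition above) =====
theorem findSignature_spec : Claim_equal_findSignature := by
  intro tps _
  unfold Spec_findSignature
  rw [findSignature_eq, findSignature_alt_eq]
  cases tps with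
  | nil => rfl
  | cons t ts =>
    set sig : List Bool := (t :: ts).map (fun pt => pt.isSome) with hsig
    have hne : sig.length ≠ 0 := by simp [hsig]
    rw [if_pos hne]
    have hlen : ((t :: ts).length : Int) = (sig.length : Int) := by simp [hsig]
    have hkey0 : keyB sig = keyN sig 0 := by
      unfold keyN; simp
    have hinv := loop_inv (2 ^ (sig.length - 1)) sig rfl sig 0 (by simp) (-1, none)
    simp only [Nat.cast_zero] at hinv
    rw [hkey0, hinv, hlen]
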